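-- pv_equiv track=rewrite | github.com/Mahdi-s/vivarium | src/aam/output_parsing.py | _collapse_ws_with_map
-- ===== SOURCE A (Python) =====
-- from typing import Any, Dict, Iterable, List, Optional, Sequence, Tuple
--
-- def _collapse_ws_with_map(text: str) -> Tuple[str, List[int]]:
--     """
--     Collapse all whitespace to single spaces while keeping a map from each character
--     in the collapsed string back to an index in the original string.
--     """
--     out_chars: List[str] = []
--     idx_map: List[int] = []
--     in_space = False
--     for i, ch in enumerate(text):
--         if ch.isspace():
--             if not in_space:
--                 out_chars.append(" ")
--                 idx_map.append(i)
--                 in_space = True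
--             continue
--         out_chars.append(ch)
--         idx_map.append(i)
--         in_space = False
--
--     # Trim leading/trailing spaces in the collapsed view (keep maps aligned).
--     collapsed = "".join(out_chars)
--     if not collapsed:
--         return "", []
--     start = 0
--     end = len(collapsed)
--     while start < end and collapsed[start] == " ":
--         start += 1
--     while end > start and collapsed[end - 1] == " ":
--         end -= 1
--     return collapsed[start:end], idx_map[start:end]
-- ===== SOURCE B (Python) =====
-- from typing import List, Tuple
--
-- def _collapse_ws_with_map(text: str) -> Tuple[str, List[int]]:
--     """
--     Two staged passes: first throw away all whitespace, keeping only the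
--     non-whitespace (index, char) pairs; then rebuild the single collapsed
--     spaces purely from arithmetic gaps between surviving indices (a gap
--     means a whitespace run began at prev + 1).  Leading/trailing whitespace
--     never produces a pair, so no trimming step exists.
--     """
--     keep = [(i, ch) for i, ch in enumerate(text) if not ch.isspace()]
--     chars: List[str] = []
--     idx: List[int] = []
--     prev = None
--     for i, ch in keep:
--         if prev is not None and i > prev + 1:
--             chars.append(' ')
--             idx.append(prev + 1)
--         chars.append(ch)
--         idx.append(i)
--         prev = i
--     return ''.join(chars), idx
-- ===== Notes on version B (the rewrite author's own statement) =====
-- stated objective: alternative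
-- what changed: Instead of A's stateful single pass (in_space flag emitting a space at each whitespace-run start, followed by two while-loop trims of the collapsed view), B first filters the text down to its non-whitespace (index, char) pairs and then reconstructs each collapsed space purely from an arithmetic gap between consecutive surviving indices (gap start prev+1), so no whitespace state and no trim step exist.
import Mathlib
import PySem

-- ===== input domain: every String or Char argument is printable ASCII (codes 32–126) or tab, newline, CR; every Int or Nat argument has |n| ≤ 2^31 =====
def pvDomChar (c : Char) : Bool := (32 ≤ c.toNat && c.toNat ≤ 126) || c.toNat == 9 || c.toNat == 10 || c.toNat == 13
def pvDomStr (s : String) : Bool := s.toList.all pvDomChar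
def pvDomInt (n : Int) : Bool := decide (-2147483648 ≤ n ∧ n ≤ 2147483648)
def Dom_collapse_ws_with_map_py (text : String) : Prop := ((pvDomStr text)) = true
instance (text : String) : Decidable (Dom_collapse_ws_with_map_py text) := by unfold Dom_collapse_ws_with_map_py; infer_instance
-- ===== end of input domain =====

-- B replaces A's in_space-flag scan plus two while-loop trims by two staged passes:
-- filter the text to its non-whitespace (index, char) pairs, then reconstruct each
-- collapsed space from an arithmetic gap between consecutive kept indices
-- (objective: alternative decomposition, no whitespace state and no trim step).

-- ===== PORT A =====
-- A's for-loop: state (out_chars, idx_map, in_space), appending at the end as the Python does.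
def pvALoop : List (Int × Char) → List Char → List Int → Bool → List Char × List Int × Bool
  | [], out, idx, ins => (out, idx, ins)
  | (i, ch) :: rest, out, idx, ins =>
    if PySem.Chars.isspace ch then
      if !ins then pvALoop rest (out ++ [' ']) (idx ++ [i]) true
      else pvALoop rest out idx ins
    else pvALoop rest (out ++ [ch]) (idx ++ [i]) false

-- A's `while start < end and collapsed[start] == " "` (index always in range since s < e ≤ len)
def pvAStart (cs : List Char) (s e : Nat) : Nat :=
  if h : s < e ∧ cs[s]? = some ' ' then pvAStart cs (s + 1) e else s
  termination_by e - s
  decreasing_by omega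

-- A's `while end > start and collapsed[end-1] == " "`
def pvAEnd (cs : List Char) (s e : Nat) : Nat :=
  if h : s < e ∧ cs[e - 1]? = some ' ' then pvAEnd cs s (e - 1) else e
  termination_by e
  decreasing_by omega

def collapse_ws_with_map_py (text : String) : String × List Int :=
  let st := pvALoop (PySem.List.enumerate text.toList 0) [] [] false
  let collapsed := st.1
  let idx := st.2.1
  if collapsed = [] then ("", [])
  else
    let s := pvAStart collapsed 0 collapsed.length
    let e := pvAEnd collapsed s collapsed.length
    -- collapsed[start:end] / idx_map[start:end] with 0 ≤ s ≤ e ≤ len: drop-then-take is exact here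
    (String.ofList ((collapsed.drop s).take (e - s)), (idx.drop s).take (e - s))

-- ===== PORT B =====
-- Source B's second pass: one step of the for-loop over keep, state (chars, idx, prev), appending.
def pvBStep (st : List Char × List Int × Option Int) (p : Int × Char) :
    List Char × List Int × Option Int :=
  match st.2.2 with
  | some q =>
    if p.1 > q + 1 then (st.1 ++ [' ', p.2], st.2.1 ++ [q + 1, p.1], some p.1)
    else (st.1 ++ [p.2], st.2.1 ++ [p.1], some p.1)
  | none => (st.1 ++ [p.2], st.2.1 ++ [p.1], some p.1)

def collapse_ws_with_map_py_alt (text : String) : String × List Int :=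
  -- pass 1: keep = [(i, ch) for i, ch in enumerate(text) if not ch.isspace()]
  let keep := (PySem.List.enumerate text.toList 0).filter (fun p => !PySem.Chars.isspace p.2)
  -- pass 2: the for-loop over keep
  let st := keep.foldl pvBStep ([], [], none)
  (String.ofList st.1, st.2.1)

-- ===== PRECONDITION & SPEC =====
def Spec_collapse_ws_with_map_py (text : String) (out : String × List Int) : Prop := out = collapse_ws_with_map_py_alt text
instance (text : String) (out : String × List Int) : Decidable (Spec_collapse_ws_with_map_py text out) := by unfold Spec_collapse_ws_with_map_py; infer_instance

-- ===== CLAIM (what is proved, stated in full; the proofs are below) =====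
def Claim_equal_collapse_ws_with_map_py : Prop := ∀ (text : String), Dom_collapse_ws_with_map_py text → Spec_collapse_ws_with_map_py text (collapse_ws_with_map_py text)

-- ===== LEMMAS AND PROOFS =====

-- A's flag-scan, stripped of its accumulators: the pair list it effectively emits.
def pvFlag : Bool → List (Int × Char) → List (Int × Char)
  | _, [] => []
  | s, (i, c) :: rest =>
    if PySem.Chars.isspace c then
      if s then pvFlag true rest else (i, ' ') :: pvFlag true rest
    else (i, c) :: pvFlag false rest

theorem pvALoop_eq (l : List (Int × Char)) : ∀ (out : List Char) (idx : List Int) (s : Bool),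
    (pvALoop l out idx s).1 = out ++ (pvFlag s l).map (·.2) ∧
    (pvALoop l out idx s).2.1 = idx ++ (pvFlag s l).map (·.1) := by
  induction l with
  | nil => intro out idx s; simp [pvALoop, pvFlag]
  | cons p rest ih =>
    intro out idx s
    obtain ⟨i, c⟩ := p
    by_cases hc : PySem.Chars.isspace c
    · cases s <;> simp [pvALoop, pvFlag, hc, ih]
    · simp [pvALoop, pvFlag, hc, ih]

-- drop the (at most one) leading / trailing space pair
def pvDropFront (l : List (Int × Char)) : List (Int × Char) :=
  if l.head?.map (·.2) = some ' ' then l.tail else l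

def pvDropBack (l : List (Int × Char)) : List (Int × Char) :=
  if l.getLast?.map (·.2) = some ' ' then l.dropLast else l

theorem pvDropBack_cons_cons (x y : Int × Char) (t : List (Int × Char)) :
    pvDropBack (x :: y :: t) = x :: pvDropBack (y :: t) := by
  unfold pvDropBack
  rw [List.getLast?_cons_cons]
  by_cases h : (y :: t).getLast?.map (·.2) = some ' ' <;> simp [h]

theorem pvDropBack_cons_nonspace (x : Int × Char) (l : List (Int × Char)) (hx : x.2 ≠ ' ') :
    pvDropBack (x :: l) = x :: pvDropBack l := by
  cases l with
  | nil => simp [pvDropBack, hx]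
  | cons y t => exact pvDropBack_cons_cons x y t

-- the head of pvFlag true is never a space pair
theorem pvFlag_true_head (l : List (Int × Char)) :
    ∀ y ∈ (pvFlag true l).head?, PySem.Chars.isspace y.2 = false := by
  induction l with
  | nil => simp [pvFlag]
  | cons p rest ih =>
    obtain ⟨i, c⟩ := p
    by_cases hc : PySem.Chars.isspace c
    · simpa [pvFlag, hc] using ih
    · simp [pvFlag, hc]

-- no two consecutive space pairs in pvFlag's output
theorem pvFlag_chain (l : List (Int × Char)) : ∀ b : Bool,
    List.IsChain (fun a b => a.2 = ' ' → b.2 ≠ ' ') (pvFlag b l) := by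
  induction l with
  | nil => intro b; simp [pvFlag]
  | cons p rest ih =>
    intro b
    obtain ⟨i, c⟩ := p
    by_cases hc : PySem.Chars.isspace c
    · cases b with
      | true => simpa [pvFlag, hc] using ih true
      | false =>
        simp only [pvFlag, hc, if_true, Bool.false_eq_true, if_false]
        rw [List.isChain_cons]
        refine ⟨?_, ih true⟩
        intro y hy _
        have := pvFlag_true_head rest y hy
        intro habs
        rw [habs] at this
        simp [PySem.Chars.isspace] at this
    · simp only [pvFlag, hc, Bool.false_eq_true, if_false]
      rw [List.isChain_cons]
      refine ⟨?_, ih false⟩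
      intro y _ habs
      have : c = ' ' := habs
      subst this
      exact absurd (show PySem.Chars.isspace ' ' = true by decide) (by simpa using hc)

-- A's leading-space loop under the no-double-space invariant
theorem pvAStart_eq (cs : List Char)
    (hch : List.IsChain (fun a b => a = ' ' → b ≠ ' ') cs) :
    pvAStart cs 0 cs.length = if cs.head? = some ' ' then 1 else 0 := by
  cases cs with
  | nil => rw [pvAStart]; simp
  | cons c rest =>
    by_cases hc : c = ' '
    · subst hc
      rw [pvAStart]
      simp only [List.length_cons, List.getElem?_cons_zero]
      rw [dif_pos (by constructor <;> simp)]
      cases rest with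
      | nil => rw [pvAStart]; simp
      | cons d t =>
        have hd : d ≠ ' ' := (List.isChain_cons.mp hch).1 d rfl rfl
        rw [pvAStart]
        simp [hd]
    · rw [pvAStart]
      simp [hc]

-- A's trailing-space loop under the invariant, started at the s computed above
theorem pvAEnd_eq (cs : List Char)
    (hch : List.IsChain (fun a b => a = ' ' → b ≠ ' ') cs)
    (s : Nat) (hs : s = if cs.head? = some ' ' then 1 else 0) :
    pvAEnd cs s cs.length =
      if cs.getLast? = some ' ' ∧ s < cs.length then cs.length - 1 else cs.length := by
  have hchain := List.isChain_iff_getElem.mp hch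
  have hs01 : s ≤ 1 := by rw [hs]; split <;> omega
  by_cases hcond : cs.getLast? = some ' ' ∧ s < cs.length
  · obtain ⟨hlast, hlt⟩ := hcond
    have hne : cs ≠ [] := by intro h; subst h; simp at hlast
    have hlen : 0 < cs.length := List.length_pos_iff.mpr hne
    have hget : cs[cs.length - 1]? = some ' ' := by
      rwa [← List.getLast?_eq_getElem?]
    rw [pvAEnd, dif_pos ⟨hlt, hget⟩, if_pos ⟨hlast, hlt⟩]
    by_cases h2 : s < cs.length - 1
    · -- the previous char is not a space, so the loop stops after one step
      have hprev : cs[cs.length - 2]? ≠ some ' ' := by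
        intro habs
        have hn2 : 2 ≤ cs.length := by omega
        rw [List.getElem?_eq_getElem (by omega), Option.some_inj] at habs
        have hstep := hchain (cs.length - 2) (by omega)
        simp only [show cs.length - 2 + 1 = cs.length - 1 from by omega] at hstep
        have hl : cs[cs.length - 1] = ' ' := by
          rwa [List.getElem?_eq_getElem (by omega), Option.some_inj] at hget
        exact (hstep habs) hl
      have hno : ¬(s < cs.length - 1 ∧ cs[cs.length - 1 - 1]? = some ' ') := by
        rintro ⟨_, habs⟩
        rw [show cs.length - 1 - 1 = cs.length - 2 by omega] at habs
        exact hprev habs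
      rw [pvAEnd, dif_neg hno]
    · -- the loop hits the lower bound s = cs.length - 1
      have hno : ¬(s < cs.length - 1 ∧ cs[cs.length - 1 - 1]? = some ' ') := by
        rintro ⟨habs, _⟩
        omega
      rw [pvAEnd, dif_neg hno]
  · have hno : ¬(s < cs.length ∧ cs[cs.length - 1]? = some ' ') := by
      rintro ⟨hlt, hget⟩
      exact hcond ⟨by rwa [List.getLast?_eq_getElem?], hlt⟩
    rw [pvAEnd, dif_neg hno, if_neg hcond]

-- the conditional drops at each end equal A's slice [s:e] on the pair list
theorem pvTrim_eq (P : List (Int × Char))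
    (hne : P ≠ []) (s e : Nat)
    (hs : s = if (P.map (·.2)).head? = some ' ' then 1 else 0)
    (he : e = if (P.map (·.2)).getLast? = some ' ' ∧ s < P.length then P.length - 1 else P.length) :
    (P.drop s).take (e - s) = pvDropBack (pvDropFront P) := by
  have hfront : pvDropFront P = P.drop s := by
    cases P with
    | nil => simp at hne
    | cons p rest =>
      obtain ⟨i, c⟩ := p
      by_cases hc : c = ' '
      · subst hc; subst hs
        simp [pvDropFront]
      · subst hs
        rw [pvDropFront, if_neg (by simp [hc])]
        rw [List.map_cons, List.head?_cons, if_neg (by simp [hc]), List.drop_zero]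
  rw [hfront]
  have hQlast : s < P.length → (P.drop s).getLast? = P.getLast? := by
    intro h; rw [List.getLast?_drop, if_neg (by omega)]
  by_cases hcond : (P.map (·.2)).getLast? = some ' ' ∧ s < P.length
  · obtain ⟨hlast, hlt⟩ := hcond
    rw [List.getLast?_map] at hlast
    have hQl : (P.drop s).getLast?.map (·.2) = some ' ' := by rw [hQlast hlt]; exact hlast
    have he' : e - s = (P.drop s).length - 1 := by
      rw [he, if_pos ⟨by rw [List.getLast?_map]; exact hlast, hlt⟩, List.length_drop]; omega
    rw [he', ← List.dropLast_eq_take, pvDropBack, if_pos hQl]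
  · have he' : e = P.length := by rw [he, if_neg hcond]
    have htk : (P.drop s).take (e - s) = P.drop s := by
      rw [he']; apply List.take_of_length_le; rw [List.length_drop]
    have hnos : ¬((P.drop s).getLast?.map (·.2) = some ' ') := by
      intro habs
      have hQne : P.drop s ≠ [] := by
        intro h; rw [h] at habs; simp at habs
      have hslt : s < P.length := by
        by_contra hge
        exact hQne (List.drop_eq_nil_of_le (by omega))
      exact hcond ⟨by rw [List.getLast?_map, ← hQlast hslt]; exact habs, hslt⟩
    rw [htk, pvDropBack, if_neg hnos]

-- the common word-scan specification both trimmed results equal: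
-- pvH = before the first word, pvF = just after a word char, pvG = inside an interior
-- whitespace run whose first index is f
mutual
def pvH : List Char → Int → List (Int × Char)
  | [], _ => []
  | c :: cs, n => if PySem.Chars.isspace c then pvH cs (n + 1) else (n, c) :: pvF cs (n + 1)
def pvF : List Char → Int → List (Int × Char)
  | [], _ => []
  | c :: cs, n => if PySem.Chars.isspace c then pvG cs (n + 1) n else (n, c) :: pvF cs (n + 1)
def pvG : List Char → Int → Int → List (Int × Char)
  | [], _, _ => []
  | c :: cs, n, f => if PySem.Chars.isspace c then pvG cs (n + 1) f else (f, ' ') :: (n, c) :: pvF cs (n + 1)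
end

theorem pv_nonspace_ne (c : Char) (hc : ¬ PySem.Chars.isspace c = true) : c ≠ ' ' := by
  intro h; subst h; exact hc (by decide)

-- A-side: dropping the edge space pairs from pvFlag's output gives the word scan
theorem pvA_trim_spec (cs : List Char) : ∀ n : Int,
    pvDropBack (pvFlag true (PySem.List.enumerate cs n)) = pvH cs n ∧
    pvDropBack (pvFlag false (PySem.List.enumerate cs n)) = pvF cs n ∧
    ∀ f : Int, pvDropBack ((f, ' ') :: pvFlag true (PySem.List.enumerate cs n)) = pvG cs n f := by
  induction cs with
  | nil =>
    intro n
    refine ⟨by simp [pvFlag, pvDropBack, pvH], by simp [pvFlag, pvDropBack, pvF], ?_⟩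
    intro f
    simp [PySem.List.enumerate_nil, pvFlag, pvDropBack, pvG]
  | cons c cs ih =>
    intro n
    obtain ⟨ihT, ihF, ihG⟩ := ih (n + 1)
    by_cases hc : PySem.Chars.isspace c
    · refine ⟨?_, ?_, ?_⟩
      · simpa [PySem.List.enumerate_cons, pvFlag, hc, pvH] using ihT
      · simpa [PySem.List.enumerate_cons, pvFlag, hc, pvF] using ihG n
      · intro f
        simpa [PySem.List.enumerate_cons, pvFlag, hc, pvG] using ihG f
    · have hne : c ≠ ' ' := pv_nonspace_ne c hc
      refine ⟨?_, ?_, ?_⟩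
      · rw [PySem.List.enumerate_cons]
        simp only [pvFlag, hc, Bool.false_eq_true, if_false]
        rw [pvDropBack_cons_nonspace _ _ hne, ihF]
        simp [pvH, hc]
      · rw [PySem.List.enumerate_cons]
        simp only [pvFlag, hc, Bool.false_eq_true, if_false]
        rw [pvDropBack_cons_nonspace _ _ hne, ihF]
        simp [pvF, hc]
      · intro f
        rw [PySem.List.enumerate_cons]
        simp only [pvFlag, hc, Bool.false_eq_true, if_false]
        rw [pvDropBack_cons_cons, pvDropBack_cons_nonspace _ _ hne, ihF]
        simp [pvG, hc]

theorem pvA_trim_eq (cs : List Char) (n : Int) :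
    pvDropBack (pvDropFront (pvFlag false (PySem.List.enumerate cs n))) = pvH cs n := by
  cases cs with
  | nil => simp [PySem.List.enumerate_nil, pvFlag, pvDropFront, pvDropBack, pvH]
  | cons c cs =>
    by_cases hc : PySem.Chars.isspace c
    · rw [PySem.List.enumerate_cons]
      simp only [pvFlag, hc, if_true, Bool.false_eq_true, if_false]
      rw [pvDropFront, if_pos (by simp), List.tail_cons]
      rw [(pvA_trim_spec cs (n + 1)).1]
      simp [pvH, hc]
    · have hne : c ≠ ' ' := pv_nonspace_ne c hc
      rw [PySem.List.enumerate_cons]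
      simp only [pvFlag, hc, Bool.false_eq_true, if_false]
      rw [pvDropFront, if_neg (by simp [hne])]
      rw [pvDropBack_cons_nonspace _ _ hne, (pvA_trim_spec cs (n + 1)).2.1]
      simp [pvH, hc]

-- B-side: pvBE is Source B's for-loop as a cons-building recursion
def pvBE : List (Int × Char) → Option Int → List (Int × Char)
  | [], _ => []
  | (i, c) :: rest, prev =>
    (match prev with
     | some q => if i > q + 1 then [(q + 1, ' '), (i, c)] else [(i, c)]
     | none => [(i, c)]) ++ pvBE rest (some i)

theorem pvB_fold_eq (l : List (Int × Char)) : ∀ (chars : List Char) (idx : List Int) (prev : Option Int),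
    (l.foldl pvBStep (chars, idx, prev)).1 = chars ++ (pvBE l prev).map (·.2) ∧
    (l.foldl pvBStep (chars, idx, prev)).2.1 = idx ++ (pvBE l prev).map (·.1) := by
  induction l with
  | nil => intro chars idx prev; simp [pvBE]
  | cons p rest ih =>
    intro chars idx prev
    obtain ⟨i, c⟩ := p
    cases prev with
    | none => simp [List.foldl_cons, pvBStep, pvBE, ih]
    | some q =>
      by_cases h : i > q + 1 <;> simp [List.foldl_cons, pvBStep, pvBE, h, ih]

-- B-side: the filtered-enumerate loop computes the same word scan
theorem pvB_spec (cs : List Char) : ∀ n : Int,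
    pvBE ((PySem.List.enumerate cs n).filter (fun p => !PySem.Chars.isspace p.2)) none = pvH cs n ∧
    pvBE ((PySem.List.enumerate cs n).filter (fun p => !PySem.Chars.isspace p.2)) (some (n - 1)) = pvF cs n ∧
    ∀ f : Int, f < n →
      pvBE ((PySem.List.enumerate cs n).filter (fun p => !PySem.Chars.isspace p.2)) (some (f - 1)) = pvG cs n f := by
  induction cs with
  | nil =>
    intro n
    refine ⟨by simp [pvBE, pvH], by simp [pvBE, pvF], ?_⟩
    intro f _
    simp [PySem.List.enumerate_nil, pvBE, pvG]
  | cons c cs ih =>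
    intro n
    obtain ⟨ihH, ihF, ihG⟩ := ih (n + 1)
    by_cases hc : PySem.Chars.isspace c
    · refine ⟨?_, ?_, ?_⟩
      · simpa [PySem.List.enumerate_cons, List.filter_cons, hc, pvH] using ihH
      · have := ihG n (by omega)
        simpa [PySem.List.enumerate_cons, List.filter_cons, hc, pvF] using this
      · intro f hf
        have := ihG f (by omega)
        simpa [PySem.List.enumerate_cons, List.filter_cons, hc, pvG] using this
    · have hF : pvBE ((PySem.List.enumerate cs (n + 1)).filter (fun p => !PySem.Chars.isspace p.2)) (some n) = pvF cs (n + 1) := by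
        have := ihF
        rwa [show n + 1 - 1 = n from by ring] at this
      refine ⟨?_, ?_, ?_⟩
      · rw [PySem.List.enumerate_cons]
        simp only [List.filter_cons, hc, Bool.not_false, if_true]
        rw [pvBE, hF]
        simp [pvH, hc]
      · rw [PySem.List.enumerate_cons]
        simp only [List.filter_cons, hc, Bool.not_false, if_true]
        rw [pvBE, hF]
        simp [pvF, hc]
      · intro f hf
        rw [PySem.List.enumerate_cons]
        simp only [List.filter_cons, hc, Bool.not_false, if_true]
        rw [pvBE, hF]
        simp [pvG, hc, hf]

-- ===== VERDICT =====
theorem collapse_ws_with_map_py_spec : Claim_equal_collapse_ws_with_map_py := by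
  intro text _
  unfold Spec_collapse_ws_with_map_py collapse_ws_with_map_py collapse_ws_with_map_py_alt
  obtain ⟨hA1, hA2⟩ := pvALoop_eq (PySem.List.enumerate text.toList 0) [] [] false
  obtain ⟨hB1, hB2⟩ := pvB_fold_eq ((PySem.List.enumerate text.toList 0).filter (fun p => !PySem.Chars.isspace p.2)) [] [] none
  simp only [hA1, hA2, hB1, hB2, List.nil_append]
  set P := pvFlag false (PySem.List.enumerate text.toList 0) with hP
  have hBH : pvBE ((PySem.List.enumerate text.toList 0).filter (fun p => !PySem.Chars.isspace p.2)) none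
      = pvH text.toList 0 := (pvB_spec text.toList 0).1
  have hAH : pvDropBack (pvDropFront P) = pvH text.toList 0 := pvA_trim_eq text.toList 0
  rw [hBH]
  by_cases hne : P = []
  · rw [hne]
    have : pvH text.toList 0 = [] := by
      rw [← hAH, hne]; simp [pvDropFront, pvDropBack]
    rw [this]
    simp
  · have hmapne : P.map (·.2) ≠ [] := by simpa using hne
    rw [if_neg hmapne]
    have hchain : List.IsChain (fun a b => a = ' ' → b ≠ ' ') (P.map (·.2)) := by
      rw [List.isChain_map]
      exact pvFlag_chain _ false
    have hlen : (P.map (·.2)).length = P.length := List.length_map ..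
    set s := pvAStart (P.map (·.2)) 0 (P.map (·.2)).length with hsdef
    set e := pvAEnd (P.map (·.2)) s (P.map (·.2)).length with hedef
    have hs : s = if (P.map (·.2)).head? = some ' ' then 1 else 0 := by
      rw [hsdef, pvAStart_eq _ hchain]
    have he : e = if (P.map (·.2)).getLast? = some ' ' ∧ s < P.length then P.length - 1
        else P.length := by
      rw [hedef, pvAEnd_eq _ hchain s hs, hlen]
    have htrim := pvTrim_eq P hne s e hs he
    rw [← List.map_drop, ← List.map_drop, ← List.map_take, ← List.map_take, htrim, hAH]
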